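-- pv_equiv track=rewrite | github.com/quangvinh2110/ext-chatbot | src/processor/table/column_grouper.py | _merge_groups_by_rule
-- ===== SOURCE A (Python) =====
-- from typing import Optional, Dict, Any, List, Literal, Set, Tuple
--
-- def _merge_groups_by_rule(
--
--     groups: List[List[str]],
--     min_size: int = 3,
--     max_size: int = 8,
-- ) -> List[List[str]]:
--     """
--     Merges small adjacent groups into larger groups.
--     """
--     if not groups:
--         return []
--     merged_groups = []
--     i, n = 0, len(groups)
--     while i < n:
--         current_group = groups[i]
--         if len(current_group) < min_size:
--             new_group = list(current_group)
--             j = i + 1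
--             while j < n:
--                 next_group = groups[j]
--                 if len(next_group) < min_size and (len(new_group) + len(next_group)) <= max_size:
--                     new_group.extend(next_group)
--                     j += 1
--                 else:
--                     break
--             merged_groups.append(new_group)
--             i = j
--         else:
--             merged_groups.append(current_group)
--             i += 1
--     return merged_groups
-- ===== SOURCE B (Python) =====
-- def _merge_groups_by_rule(
--     groups,
--     min_size: int = 3,
--     max_size: int = 8,
-- ):
--     """Merge small adjacent groups: one flat loop carrying a pending accumulator."""
--     result = []
--     pending = None
--     for g in groups:
--         if len(g) < min_size:
--             if pending is not None and len(pending) + len(g) <= max_size: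
--                 pending.extend(g)
--             else:
--                 if pending is not None:
--                     result.append(pending)
--                 pending = list(g)
--         else:
--             if pending is not None:
--                 result.append(pending)
--                 pending = None
--             result.append(g)
--     if pending is not None:
--         result.append(pending)
--     return result
-- ===== Notes on version B (the rewrite author's own statement) =====
-- stated objective: simpler
-- what changed: Replaced the index-based outer while with a nested inner absorption loop by a single flat loop over groups carrying a pending accumulator that is flushed when a large group or a non-fitting small group arrives.
import Mathlib
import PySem

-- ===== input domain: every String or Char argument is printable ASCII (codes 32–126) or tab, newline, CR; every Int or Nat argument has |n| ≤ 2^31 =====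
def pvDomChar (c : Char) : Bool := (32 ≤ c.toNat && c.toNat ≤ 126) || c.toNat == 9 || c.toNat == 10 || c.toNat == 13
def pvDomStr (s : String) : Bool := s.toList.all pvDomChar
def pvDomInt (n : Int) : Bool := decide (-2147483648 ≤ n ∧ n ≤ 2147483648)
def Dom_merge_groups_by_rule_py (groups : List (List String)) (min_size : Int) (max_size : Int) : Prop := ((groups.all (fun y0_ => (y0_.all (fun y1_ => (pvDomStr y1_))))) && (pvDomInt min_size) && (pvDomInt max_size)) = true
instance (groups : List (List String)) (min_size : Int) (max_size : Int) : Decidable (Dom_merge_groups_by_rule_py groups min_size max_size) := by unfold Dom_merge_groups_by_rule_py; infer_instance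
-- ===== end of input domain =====

-- B replaces A's outer-index loop with an inner absorption while-loop by one flat
-- loop over the groups carrying a pending accumulator (objective: simpler).

-- ===== PORT A =====
-- inner while loop of A: absorb following small groups into new_group while they fit;
-- returns (new_group, remaining suffix)  (j advancing = consuming the suffix)
def mgAbsorb (min_size max_size : Int) (new_group : List String) :
    List (List String) → List String × List (List String)
  | [] => (new_group, [])
  | next_group :: rest =>
    if (next_group.length : Int) < min_size ∧
        (new_group.length : Int) + (next_group.length : Int) ≤ max_size then
      mgAbsorb min_size max_size (new_group ++ next_group) rest
    else
      (new_group, next_group :: rest)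

-- needed by mgLoopA's termination
theorem mgAbsorb_len_le (min_size max_size : Int) (ng : List String)
    (l : List (List String)) : (mgAbsorb min_size max_size ng l).2.length ≤ l.length := by
  induction l generalizing ng with
  | nil => simp [mgAbsorb]
  | cons h t ih =>
    simp only [mgAbsorb]
    split
    · exact le_trans (ih _) (Nat.le_succ _)
    · simp

-- outer while loop of A (i advancing = consuming the list from index i on)
def mgLoopA (min_size max_size : Int) : List (List String) → List (List String)
  | [] => []
  | current_group :: rest =>
    if (current_group.length : Int) < min_size then
      let res := mgAbsorb min_size max_size current_group rest
      res.1 :: mgLoopA min_size max_size res.2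
    else
      current_group :: mgLoopA min_size max_size rest
  termination_by l => l.length
  decreasing_by
  · exact Nat.lt_succ_of_le (mgAbsorb_len_le _ _ _ _)
  · simp

def merge_groups_by_rule_py (groups : List (List String)) (min_size : Int) (max_size : Int) : List (List String) :=
  if groups = [] then [] else mgLoopA min_size max_size groups

-- ===== PORT B =====
-- one step of B's flat loop; state = (result built so far, pending accumulator)
def mgStepB (min_size max_size : Int)
    (st : List (List String) × Option (List String)) (g : List String) :
    List (List String) × Option (List String) :=
  if (g.length : Int) < min_size then
    match st.2 with
    | some p =>
      if (p.length : Int) + (g.length : Int) ≤ max_size then (st.1, some (p ++ g))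
      else (st.1 ++ [p], some g)
    | none => (st.1, some g)
  else
    match st.2 with
    | some p => (st.1 ++ [p, g], none)
    | none => (st.1 ++ [g], none)

def merge_groups_by_rule_py_alt (groups : List (List String)) (min_size : Int) (max_size : Int) : List (List String) :=
  match groups.foldl (mgStepB min_size max_size) ([], none) with
  | (res, some p) => res ++ [p]
  | (res, none) => res

-- ===== PRECONDITION & SPEC =====
def Spec_merge_groups_by_rule_py (groups : List (List String)) (min_size : Int) (max_size : Int) (out : List (List String)) : Prop := out = merge_groups_by_rule_py_alt groups min_size max_size
instance (groups : List (List String)) (min_size : Int) (max_size : Int) (out : List (List String)) : Decidable (Spec_merge_groups_by_rule_py groups min_size max_size out) := by unfold Spec_merge_groups_by_rule_py; infer_instance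

-- ===== CLAIM (what is proved, stated in full; the proofs are below) =====
def Claim_equal_merge_groups_by_rule_py : Prop := ∀ (groups : List (List String)) (min_size : Int) (max_size : Int), Dom_merge_groups_by_rule_py groups min_size max_size → Spec_merge_groups_by_rule_py groups min_size max_size (merge_groups_by_rule_py groups min_size max_size)

-- ===== LEMMAS AND PROOFS =====

-- "what B outputs from here on", ignoring the already-built result prefix
def mgRunB (min_size max_size : Int) : List (List String) → Option (List String) → List (List String)
  | [], none => []
  | [], some p => [p]
  | g :: rest, pend =>
    if (g.length : Int) < min_size then
      match pend with
      | some p =>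
        if (p.length : Int) + (g.length : Int) ≤ max_size then
          mgRunB min_size max_size rest (some (p ++ g))
        else p :: mgRunB min_size max_size rest (some g)
      | none => mgRunB min_size max_size rest (some g)
    else
      match pend with
      | some p => p :: g :: mgRunB min_size max_size rest none
      | none => g :: mgRunB min_size max_size rest none

theorem foldl_mgStepB_eq_mgRunB (min_size max_size : Int) (l : List (List String))
    (res : List (List String)) (pend : Option (List String)) :
    (match l.foldl (mgStepB min_size max_size) (res, pend) with
      | (r, some p) => r ++ [p]
      | (r, none) => r) = res ++ mgRunB min_size max_size l pend := by
  induction l generalizing res pend with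
  | nil => cases pend <;> simp [mgRunB]
  | cons g rest ih =>
    simp only [List.foldl_cons, mgStepB, mgRunB]
    by_cases hg : (g.length : Int) < min_size
    · cases pend with
      | none => simpa [hg] using ih res (some g)
      | some p =>
        by_cases hfit : (p.length : Int) + (g.length : Int) ≤ max_size
        · simpa [hg, hfit] using ih res (some (p ++ g))
        · simp only [hg, hfit, if_pos, if_neg, not_false_iff]
          rw [ih (res ++ [p]) (some g)]
          simp
    · cases pend with
      | none =>
        rw [if_neg hg, ih (res ++ [g]) none]
        simp [hg]
      | some p =>
        rw [if_neg hg, ih (res ++ [p, g]) none]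
        simp [hg]

theorem alt_eq_mgRunB (groups : List (List String)) (min_size max_size : Int) :
    merge_groups_by_rule_py_alt groups min_size max_size =
      mgRunB min_size max_size groups none := by
  have h := foldl_mgStepB_eq_mgRunB min_size max_size groups [] none
  unfold merge_groups_by_rule_py_alt
  simp only [List.nil_append] at h
  exact h

-- main bridge: A's loop equals B's run, proved together with the pending-absorption
-- correspondence by strong induction on the list length
theorem mgLoopA_eq_mgRunB (min_size max_size : Int) : ∀ n (l : List (List String)), l.length ≤ n →
    (mgLoopA min_size max_size l = mgRunB min_size max_size l none ∧
      ∀ p, mgRunB min_size max_size l (some p) =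
        (mgAbsorb min_size max_size p l).1 ::
          mgLoopA min_size max_size (mgAbsorb min_size max_size p l).2) := by
  intro n
  induction n with
  | zero =>
    intro l hl
    have : l = [] := List.eq_nil_of_length_eq_zero (Nat.le_zero.mp hl)
    subst this
    exact ⟨by simp [mgLoopA, mgRunB], fun p => by simp [mgRunB, mgAbsorb, mgLoopA]⟩
  | succ n ih =>
    intro l hl
    cases l with
    | nil => exact ⟨by simp [mgLoopA, mgRunB], fun p => by simp [mgRunB, mgAbsorb, mgLoopA]⟩
    | cons g rest =>
      have hrest : rest.length ≤ n := Nat.lt_succ_iff.mp (Nat.lt_of_lt_of_le (by simp) hl)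
      constructor
      · -- goA (g :: rest) = runB (g :: rest) none
        by_cases hg : (g.length : Int) < min_size
        · rw [mgLoopA]
          rw [if_pos hg]
          simp only [mgRunB, hg, if_pos]
          exact ((ih rest hrest).2 g).symm
        · rw [mgLoopA, if_neg hg]
          have h1 := (ih rest hrest).1
          simp only [mgRunB]
          rw [if_neg hg, h1]
      · -- runB (g :: rest) (some p) = absorb-based
        intro p
        by_cases hg : (g.length : Int) < min_size
        · by_cases hfit : (p.length : Int) + (g.length : Int) ≤ max_size
          · -- absorb g into p
            have h2 := (ih rest hrest).2 (p ++ g)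
            simp only [mgRunB, mgAbsorb]
            rw [if_pos hg, if_pos hfit, if_pos ⟨hg, hfit⟩, h2]
          · -- flush p, g starts new pending
            have h2 := (ih rest hrest).2 g
            simp only [mgRunB, mgAbsorb]
            rw [if_pos hg, if_neg hfit, if_neg (by tauto)]
            show p :: mgRunB min_size max_size rest (some g) =
              p :: mgLoopA min_size max_size (g :: rest)
            rw [mgLoopA, if_pos hg, h2]
        · -- g large: flush p, emit g
          have h1 := (ih rest hrest).1
          simp only [mgRunB, mgAbsorb]
          rw [if_neg hg, if_neg (by tauto)]
          show p :: g :: mgRunB min_size max_size rest none =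
            p :: mgLoopA min_size max_size (g :: rest)
          rw [mgLoopA, if_neg hg, h1]

-- ===== VERDICT (by name: the statement is the Claim_ definition above) =====
theorem merge_groups_by_rule_py_spec : Claim_equal_merge_groups_by_rule_py := by
  intro groups min_size max_size _
  unfold Spec_merge_groups_by_rule_py merge_groups_by_rule_py
  rw [alt_eq_mgRunB]
  rcases eq_or_ne groups ([] : List (List String)) with h | h
  · subst h; simp [mgRunB]
  · rw [if_neg h]
    exact (mgLoopA_eq_mgRunB min_size max_size groups.length groups le_rfl).1
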